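-- pv_equiv track=rewrite | github.com/YoruCathy/cs6120-tasks | lesson5/dominators.py | dominator_tree
-- ===== SOURCE A (Python) =====
-- from typing import Dict, Set, List, Optional
--
-- def dominator_tree(idom: Dict[str, Optional[str]]) -> Dict[str, List[str]]:
--     tree: Dict[str, List[str]] = {n: [] for n in idom}
--     for n, p in idom.items():
--         if p is not None:
--             tree[p].append(n)
--     for k in tree:
--         tree[k].sort()
--     return tree
-- ===== SOURCE B (Python) =====
-- def dominator_tree(idom):
--     tree = {n: [] for n in idom}
--     # Flip every (node, parent) entry into a (parent, node) edge, sort the whole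
--     # edge list once; equal parents are then contiguous, so one two-pointer sweep
--     # attaches each parent's full (already sorted) run of children in one step.
--     edges = sorted((p, c) for c, p in idom.items() if p is not None)
--     i = 0
--     while i < len(edges):
--         p = edges[i][0]
--         j = i
--         while j < len(edges) and edges[j][0] == p:
--             j += 1
--         tree[p] += [c for _, c in edges[i:j]]
--         i = j
--     return tree
-- ===== Notes on version B (the rewrite author's own statement) =====
-- stated objective: alternative
-- what changed: A inverts the parent map by appending each node to its parent's list and then sorting every child list in place; B instead flips the map into a (parent, child) edge list, sorts that list once globally, and attaches each parent's contiguous run of already-sorted children with a single two-pointer sweep, with no per-list sorting.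
import Mathlib
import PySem

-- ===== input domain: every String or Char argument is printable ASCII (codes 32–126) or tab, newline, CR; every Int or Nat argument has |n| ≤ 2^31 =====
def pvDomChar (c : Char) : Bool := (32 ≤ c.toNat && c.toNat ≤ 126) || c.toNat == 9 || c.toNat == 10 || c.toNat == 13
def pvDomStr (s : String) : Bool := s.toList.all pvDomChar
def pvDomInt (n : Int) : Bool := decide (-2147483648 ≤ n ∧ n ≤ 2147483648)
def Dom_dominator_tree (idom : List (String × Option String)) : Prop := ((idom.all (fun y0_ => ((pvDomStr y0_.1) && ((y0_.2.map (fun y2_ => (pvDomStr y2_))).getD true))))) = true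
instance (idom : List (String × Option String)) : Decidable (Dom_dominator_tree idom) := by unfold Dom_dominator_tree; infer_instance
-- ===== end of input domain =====

-- B replaces A's per-parent appends plus a per-list sorting pass by one global sort of the
-- flipped (parent, child) edge list and a single two-pointer sweep that attaches each
-- parent's contiguous run of children at once (objective: alternative).

-- ===== PORT A =====
def dominator_tree (idom : List (String × Option String)) : List (String × List String) :=
  let d := PySem.Dict.ofList idom
  -- tree = {n: [] for n in idom}
  let tree := d.keys.foldl (fun t n => t.insert n ([] : List String)) PySem.Dict.empty
  -- for n, p in idom.items(): if p is not None: tree[p].append(n)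
  let tree := d.items.foldl (fun t np =>
      match np.2 with
      | some p => t.modify p [] (fun l => l ++ [np.1])
      | none => t) tree
  -- for k in tree: tree[k].sort()
  let tree := tree.keys.foldl (fun t k => t.modify k [] (fun l => PySem.List.sorted l (fun x => x))) tree
  tree.items

-- ===== PORT B =====
-- inner while loop: j = i; while j < len(edges) and edges[j][0] == p: j += 1
def pvAdvance (edges : List (String × String)) (p : String) (j : Nat) : Nat :=
  if h : j < edges.length then
    if (edges[j]'h).1 == p then pvAdvance edges p (j + 1) else j
  else j
termination_by edges.length - j

-- termination fact for pvSweep (the port cites it in its decreasing_by)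
theorem pvAdvance_ge (edges : List (String × String)) (p : String) (j : Nat) :
    j ≤ pvAdvance edges p j := by
  rw [pvAdvance]
  split
  · split
    · exact le_trans (Nat.le_succ j) (pvAdvance_ge edges p (j + 1))
    · exact le_refl j
  · exact le_refl j
termination_by edges.length - j

theorem pvAdvance_self_lt (edges : List (String × String)) (i : Nat) (h : i < edges.length) :
    i < pvAdvance edges (edges[i]'h).1 i := by
  rw [pvAdvance, dif_pos h, if_pos (beq_self_eq_true _)]
  exact Nat.lt_of_lt_of_le (Nat.lt_succ_self i) (pvAdvance_ge edges _ (i + 1))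

-- outer while loop: while i < len(edges): … ; tree[p] += [c for _, c in edges[i:j]]; i = j
def pvSweep (edges : List (String × String)) (tree : PySem.Dict String (List String)) (i : Nat) :
    PySem.Dict String (List String) :=
  if h : i < edges.length then
    let p := (edges[i]'h).1
    let j := pvAdvance edges p i
    pvSweep edges
      (tree.modify p [] (fun l =>
        l ++ (PySem.List.slice edges (some (i : Int)) (some (j : Int))).map (·.2))) j
  else tree
termination_by edges.length - i
decreasing_by
  have := pvAdvance_self_lt edges i h
  omega

def dominator_tree_alt (idom : List (String × Option String)) : List (String × List String) :=
  let d := PySem.Dict.ofList idom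
  -- tree = {n: [] for n in idom}
  let tree := d.keys.foldl (fun t n => t.insert n ([] : List String)) PySem.Dict.empty
  -- edges = sorted((p, c) for c, p in idom.items() if p is not None)
  let edges := PySem.List.sorted2
      (d.items.filterMap (fun cp => cp.2.map (fun p => (p, cp.1)))) (·.1) (·.2)
  -- the two-pointer sweep over the sorted edge list
  (pvSweep edges tree 0).items

-- ===== PRECONDITION & SPEC =====
-- Pre_ excludes exactly the inputs on which the Python A raises KeyError (B raises there
-- too): some non-None immediate-dominator value is not itself a key of the dict.
def Pre_dominator_tree (idom : List (String × Option String)) : Prop :=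
  ((PySem.Dict.ofList idom).values.all (fun p =>
    p.all (fun q => (PySem.Dict.ofList idom).contains q))) = true
instance (idom : List (String × Option String)) : Decidable (Pre_dominator_tree idom) := by unfold Pre_dominator_tree; infer_instance

def pvWitness_dominator_tree : (List (String × Option String)) :=
  [("a", none), ("b", some "a"), ("c", some "a")]

def Spec_dominator_tree (idom : List (String × Option String)) (out : List (String × List String)) : Prop := out = dominator_tree_alt idom
instance (idom : List (String × Option String)) (out : List (String × List String)) : Decidable (Spec_dominator_tree idom out) := by unfold Spec_dominator_tree; infer_instance

-- ===== CLAIM (what is proved, stated in full; the proofs are below) =====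
def Claim_equal_dominator_tree : Prop := ∀ (idom : List (String × Option String)), Dom_dominator_tree idom → Pre_dominator_tree idom → Spec_dominator_tree idom (dominator_tree idom)

-- ===== LEMMAS AND PROOFS =====

-- abbreviation used only by the proofs: one child appended under its parent's key
def pvStep (t : PySem.Dict String (List String)) (pr : String × String) : PySem.Dict String (List String) :=
  t.modify pr.1 [] (fun l => l ++ [pr.2])

lemma pvSet_update_self {α : Type} [BEq α] [LawfulBEq α] (s : PySem.Set α) (xs : List α)
    (h : ∀ x ∈ xs, x ∈ s) : PySem.Set.update s xs = s := by
  rw [PySem.Set.update_eq_append_filter]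
  have : (PySem.Set.ofList xs).filter (fun y => !s.contains y) = [] := by
    rw [List.filter_eq_nil_iff]
    intro a ha
    have : a ∈ xs := (PySem.Set.mem_ofList xs a).1 ha
    rw [(PySem.Set.contains_iff s a).2 (h a this)]
    simp
  rw [this, List.append_nil]

-- the A-loop is the pvStep fold over the (parent, child) pairs of the items
lemma foldA_eq (l : List (String × Option String)) (t : PySem.Dict String (List String)) :
    l.foldl (fun t np =>
      match np.2 with
      | some p => t.modify p [] (fun l => l ++ [np.1])
      | none => t) t
    = (l.filterMap (fun np => np.2.map (fun p => (p, np.1)))).foldl pvStep t := by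
  induction l generalizing t with
  | nil => rfl
  | cons a rest ih =>
    obtain ⟨n, p⟩ := a
    cases p <;> simp [List.foldl_cons, ih, pvStep]

-- a modify-fold over distinct keys rewrites each present value
lemma getD_sortfold (ks : List String) :
    ∀ (t : PySem.Dict String (List String)) (c : String), ks.Nodup →
    (ks.foldl (fun t k => t.modify k [] (fun l => PySem.List.sorted l (fun x => x))) t).getD c []
    = if c ∈ ks then PySem.List.sorted (t.getD c []) (fun x => x) else t.getD c [] := by
  induction ks with
  | nil => simp
  | cons a rest ih =>
    intro t c hnd
    simp only [List.nodup_cons] at hnd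
    rw [List.foldl_cons, ih _ _ hnd.2, PySem.Dict.getD_modify]
    by_cases hc : c = a
    · subst hc
      simp [hnd.1]
    · simp [hc, List.mem_cons]

lemma keys_pvStep_fold (l : List (String × String)) (t : PySem.Dict String (List String))
    (h : ∀ pr ∈ l, pr.1 ∈ t.keys) : (l.foldl pvStep t).keys = t.keys := by
  have : (l.foldl pvStep t) = l.foldl (fun d x => d.modify (Prod.fst x) []
      ((fun (_ : PySem.Dict String (List String)) (x : String × String) (v : List String) => v ++ [x.2]) d x)) t := by
    rfl
  rw [this, PySem.Dict.keys_foldl_modify_key]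
  exact pvSet_update_self _ _ (by simpa using h)

lemma getD_pvStep_fold (l : List (String × String)) (t : PySem.Dict String (List String)) (c : String) :
    (l.foldl pvStep t).getD c [] = t.getD c [] ++ (l.filter (fun p => p.1 == c)).map (·.2) :=
  PySem.Dict.getD_foldl_modify_append l t c

lemma keys_sortfold (ks : List String) (t : PySem.Dict String (List String))
    (h : ∀ k ∈ ks, k ∈ t.keys) :
    (ks.foldl (fun t k => t.modify k [] (fun l => PySem.List.sorted l (fun x => x))) t).keys = t.keys := by
  have : (ks.foldl (fun t k => t.modify k [] (fun l => PySem.List.sorted l (fun x => x))) t)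
      = ks.foldl (fun d x => d.modify (id x) []
        ((fun (_ : PySem.Dict String (List String)) (_ : String) (v : List String) => PySem.List.sorted v (fun x => x)) d x)) t := rfl
  rw [this, PySem.Dict.keys_foldl_modify_key]
  exact pvSet_update_self _ _ (by simpa using h)

-- ===== dict algebra for B's sweep =====

lemma insert_getD_of_contains (t : PySem.Dict String (List String)) (p : String)
    (hnd : t.keys.Nodup) (hc : t.contains p = true) (d0 : List String) :
    t.insert p (t.getD p d0) = t := by
  show PySem.Dict.insert t p (t.getD p d0) = t
  unfold PySem.Dict.insert
  rw [if_pos hc]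
  have : t.items.map (fun pr => if pr.1 == p then (p, t.getD p d0) else pr) = t.items := by
    refine List.map_congr_left ?_ |>.trans (List.map_id _)
    intro pr hpr
    by_cases h1 : pr.1 = p
    · have h2 : t.getD pr.1 d0 = pr.2 := PySem.Dict.getD_of_mem_items t (by exact hpr) hnd d0
      rw [if_pos (by exact beq_iff_eq.mpr h1), ← h1, h2]
      rfl
    · simp [h1]
  rw [this]

lemma insert_insert_self (t : PySem.Dict String (List String)) (p : String) (v w : List String) :
    (t.insert p v).insert p w = t.insert p w := by
  by_cases hc : PySem.Dict.contains t p = true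
  · set u := PySem.Dict.mk (t.items.map (fun pr => if pr.1 == p then (p, v) else pr)) with hu
    have h1 : t.insert p v = u := by
      show PySem.Dict.insert t p v = u
      unfold PySem.Dict.insert
      rw [if_pos hc]
    have hc2 : u.contains p = true := by
      show List.any _ _ = true
      obtain ⟨pr, hpr, hb⟩ := List.any_eq_true.1 hc
      refine List.any_eq_true.2 ⟨(p, v), ?_, by simp⟩
      show (p, v) ∈ t.items.map (fun pr => if pr.1 == p then (p, v) else pr)
      exact List.mem_map.2 ⟨pr, hpr, by rw [if_pos hb]⟩
    rw [h1]
    show PySem.Dict.insert u p w = PySem.Dict.insert t p w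
    unfold PySem.Dict.insert
    rw [if_pos hc2, if_pos hc]
    congr 1
    show (t.items.map (fun pr => if pr.1 == p then (p, v) else pr)).map
        (fun pr => if pr.1 == p then (p, w) else pr) = _
    rw [List.map_map]
    refine List.map_congr_left ?_
    intro pr _
    by_cases h2 : pr.1 = p <;> simp [h2]
  · set u := PySem.Dict.mk (t.items ++ [(p, v)]) with hu
    have h1 : t.insert p v = u := by
      show PySem.Dict.insert t p v = u
      unfold PySem.Dict.insert
      rw [if_neg hc]
    have hc2 : u.contains p = true := by
      show List.any _ _ = true
      refine List.any_eq_true.2 ⟨(p, v), ?_, by simp⟩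
      show (p, v) ∈ t.items ++ [(p, v)]
      simp
    have hnk : ∀ pr ∈ t.items, (pr.1 == p) = false := by
      intro pr hpr
      by_contra hbad
      exact hc (List.any_eq_true.2 ⟨pr, hpr, by simpa using hbad⟩)
    rw [h1]
    show PySem.Dict.insert u p w = PySem.Dict.insert t p w
    unfold PySem.Dict.insert
    rw [if_pos hc2, if_neg hc]
    congr 1
    show (t.items ++ [(p, v)]).map (fun pr => if pr.1 == p then (p, w) else pr) = t.items ++ [(p, w)]
    rw [List.map_append]
    have h3 : t.items.map (fun pr => if pr.1 == p then (p, w) else pr) = t.items := by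
      refine (List.map_congr_left ?_).trans (List.map_id _)
      intro pr hpr
      simp [hnk pr hpr]
    rw [h3]
    simp

lemma modify_modify_self (t : PySem.Dict String (List String)) (p : String)
    (f g : List String → List String) :
    (t.modify p [] f).modify p [] g = t.modify p [] (fun l => g (f l)) := by
  show PySem.Dict.modify (PySem.Dict.modify t p [] f) p [] g = _
  unfold PySem.Dict.modify
  rw [PySem.Dict.getD_insert_self, insert_insert_self]

lemma keys_modify_of_contains (t : PySem.Dict String (List String)) (p : String)
    (hc : t.contains p = true) (d0 : List String) (f : List String → List String) :
    (t.modify p d0 f).keys = t.keys := by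
  show PySem.Dict.keys (PySem.Dict.modify t p d0 f) = _
  unfold PySem.Dict.modify PySem.Dict.insert
  rw [if_pos hc]
  show PySem.Dict.keys _ = PySem.Dict.keys t
  unfold PySem.Dict.keys
  rw [List.map_map]
  refine List.map_congr_left ?_
  intro pr _
  by_cases h1 : pr.1 = p <;> simp [h1]

-- appending a whole same-parent segment at once = appending its children one by one
lemma fold_const_key (p : String) (seg : List String) :
    ∀ (t : PySem.Dict String (List String)), t.keys.Nodup → t.contains p = true →
    (seg.map (fun c => (p, c))).foldl pvStep t = t.modify p [] (fun l => l ++ seg) := by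
  induction seg with
  | nil =>
    intro t hnd hc
    show t = t.modify p [] (fun l => l ++ [])
    show t = PySem.Dict.modify t p [] _
    unfold PySem.Dict.modify
    rw [show (fun l : List String => l ++ []) (t.getD p []) = t.getD p [] by simp,
      insert_getD_of_contains t p hnd hc]
  | cons c rest ih =>
    intro t hnd hc
    simp only [List.map_cons, List.foldl_cons]
    have hnd' : (pvStep t (p, c)).keys.Nodup := by
      show (t.modify p [] _).keys.Nodup
      rw [keys_modify_of_contains t p hc]
      exact hnd
    have hc' : (pvStep t (p, c)).contains p = true := by
      show (t.modify p [] _).contains p = true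
      rw [PySem.Dict.contains_modify]
      simp
    rw [ih _ hnd' hc']
    show (t.modify p [] _).modify p [] _ = _
    rw [modify_modify_self]
    simp [List.append_assoc]

-- indices scanned by the inner while loop all carry the current parent
theorem pvAdvance_fst (edges : List (String × String)) (p : String) (j : Nat) :
    ∀ (k : Nat) (hk : k < edges.length), j ≤ k → k < pvAdvance edges p j → (edges[k]'hk).1 = p := by
  intro k hk hjk hkadv
  rw [pvAdvance] at hkadv
  split at hkadv
  · split at hkadv
    · rcases Nat.eq_or_lt_of_le hjk with h | h
      · subst h
        exact eq_of_beq (by assumption)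
      · exact pvAdvance_fst edges p (j + 1) k hk h hkadv
    · omega
  · omega
termination_by edges.length - j

-- the two-pointer sweep is the one-child-at-a-time fold over the remaining edges
theorem pvSweep_eq_fold (edges : List (String × String)) (i : Nat)
    (t : PySem.Dict String (List String)) (hnd : t.keys.Nodup)
    (hc : ∀ pr ∈ edges, t.contains pr.1 = true) :
    pvSweep edges t i = (edges.drop i).foldl pvStep t := by
  rw [pvSweep]
  split
  · rename_i h
    dsimp only
    set p := (edges[i]'h).1 with hp
    set j := pvAdvance edges p i with hj
    have hij : i < j := hj ▸ pvAdvance_self_lt edges i h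
    have hterm : edges.length - j < edges.length - i := by omega
    set seg := (edges.drop i).take (j - i) with hseg
    have hslice : PySem.List.slice edges (some (i : Int)) (some (j : Int)) = seg :=
      PySem.List.slice_natCast edges i j
    have hsegfst : seg.map (fun pr => (p, pr.2)) = seg := by
      refine List.ext_getElem (by simp) ?_
      intro m hm1 hm2
      simp only [List.getElem_map]
      have hm : m < seg.length := hm2
      have hlen : seg.length ≤ j - i := by
        rw [hseg]; exact (List.length_take_le _ _)
      have hkl : i + m < edges.length := by
        have h2 := hm
        rw [hseg] at h2
        simp only [List.length_take, List.length_drop] at h2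
        omega
      have hge : seg[m]'hm = edges[i + m]'hkl := by
        simp [hseg, List.getElem_take, List.getElem_drop]
      have hfst : (seg[m]'hm).1 = p := by
        rw [hge]
        exact pvAdvance_fst edges p i (i + m) hkl (Nat.le_add_right i m) (by
          have h2 := hm
          rw [hseg] at h2
          simp only [List.length_take, List.length_drop] at h2
          omega)
      exact Prod.ext hfst.symm rfl
    have hcontp : t.contains p = true := hc _ (List.getElem_mem h)
    have hsegfold : (seg.map (·.2)).map (fun c => (p, c)) = seg := by
      rw [List.map_map]
      exact hsegfst
    have hdropsplit : edges.drop i = seg ++ edges.drop j := by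
      have h2 : edges.drop j = (edges.drop i).drop (j - i) := by
        rw [List.drop_drop]
        congr 1
        omega
      rw [hseg, h2, List.take_append_drop]
    rw [hslice]
    have hnd' : (t.modify p [] (fun l => l ++ seg.map (·.2))).keys.Nodup := by
      rw [keys_modify_of_contains t p hcontp]; exact hnd
    have hc' : ∀ pr ∈ edges, (t.modify p [] (fun l => l ++ seg.map (·.2))).contains pr.1 = true := by
      intro pr hpr
      rw [PySem.Dict.contains_modify]
      simp [hc pr hpr]
    rw [pvSweep_eq_fold edges j _ hnd' hc', hdropsplit, List.foldl_append]
    congr 1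
    rw [← fold_const_key p (seg.map (·.2)) t hnd hcontp, hsegfold]
  · rename_i h
    rw [List.drop_eq_nil_of_le (by omega)]
    rfl
termination_by edges.length - i
decreasing_by exact hterm

-- ===== order lemmas for the sorted edge list =====

-- Python's tuple comparison, as sorted2 uses it
def pvBefore (a b : String × String) : Bool :=
  decide (a.1 < b.1) || (!decide (b.1 < a.1) && decide (a.2 < b.2))

lemma pvBefore_trans {a b c : String × String} (h1 : pvBefore a b = true)
    (h2 : pvBefore b c = true) : pvBefore a c = true := by
  simp only [pvBefore, Bool.or_eq_true, Bool.and_eq_true, Bool.not_eq_true',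
    decide_eq_true_iff, decide_eq_false_iff_not] at *
  rcases h1 with h1 | ⟨h1a, h1b⟩ <;> rcases h2 with h2 | ⟨h2a, h2b⟩
  · exact Or.inl (lt_trans h1 h2)
  · exact Or.inl (lt_of_lt_of_le h1 (le_of_not_gt h2a))
  · exact Or.inl (lt_of_le_of_lt (le_of_not_gt h1a) h2)
  · exact Or.inr ⟨fun h => h2a (lt_of_lt_of_le h (le_of_not_gt h1a)), lt_trans h1b h2b⟩

lemma pvBefore_asymm {a b : String × String} (h : pvBefore a b = true) : pvBefore b a = false := by
  simp only [pvBefore, Bool.or_eq_true, Bool.and_eq_true, Bool.not_eq_true',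
    decide_eq_true_iff, decide_eq_false_iff_not] at h
  simp only [pvBefore, Bool.or_eq_false_iff, Bool.and_eq_false_iff, Bool.not_eq_false',
    decide_eq_false_iff_not]
  rcases h with h | ⟨h1, h2⟩
  · exact ⟨lt_asymm h, Or.inl (by simp [h])⟩
  · exact ⟨h1, Or.inr (by simpa using lt_asymm h2)⟩

lemma insertBy_pairwise (x : String × String) (ys : List (String × String))
    (h : ys.Pairwise (fun a b => pvBefore b a = false)) :
    (PySem.List.insertBy pvBefore x ys).Pairwise (fun a b => pvBefore b a = false) := by
  induction ys with
  | nil => simp [PySem.List.insertBy]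
  | cons y ys ih =>
    rw [List.pairwise_cons] at h
    by_cases hb : pvBefore x y = true
    · rw [show PySem.List.insertBy pvBefore x (y :: ys) = x :: y :: ys by
        simp [PySem.List.insertBy, hb]]
      refine List.pairwise_cons.2 ⟨?_, List.pairwise_cons.2 h⟩
      intro z hz
      rcases List.mem_cons.1 hz with rfl | hz2
      · exact pvBefore_asymm hb
      · rcases hb2 : pvBefore z x with _ | _
        · rfl
        · have : pvBefore z y = true := pvBefore_trans hb2 hb
          rw [h.1 z hz2] at this
          exact absurd this (by simp)
    · rw [show PySem.List.insertBy pvBefore x (y :: ys) = y :: PySem.List.insertBy pvBefore x ys by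
        simp [PySem.List.insertBy, hb]]
      refine List.pairwise_cons.2 ⟨?_, ih h.2⟩
      intro z hz
      rcases (PySem.List.mem_insertBy pvBefore x z ys).1 hz with rfl | hz2
      · simpa using hb
      · exact h.1 z hz2

lemma sorted2_pairwise (xs : List (String × String)) :
    (PySem.List.sorted2 xs (·.1) (·.2)).Pairwise (fun a b => pvBefore b a = false) := by
  show (xs.foldl (fun acc x => PySem.List.insertBy _ x acc) []).Pairwise _
  have : ∀ (l : List (String × String)) (acc : List (String × String)),
      acc.Pairwise (fun a b => pvBefore b a = false) →
      (l.foldl (fun acc x => PySem.List.insertBy pvBefore x acc) acc).Pairwise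
        (fun a b => pvBefore b a = false) := by
    intro l
    induction l with
    | nil => intro acc h; exact h
    | cons x l ih => intro acc h; exact ih _ (insertBy_pairwise x acc h)
  exact this xs [] (by simp)

-- children of one parent, read off the sorted edge list, are weakly increasing
lemma sorted2_filter_snd_pairwise (xs : List (String × String)) (k : String) :
    (((PySem.List.sorted2 xs (·.1) (·.2)).filter (fun pr => pr.1 == k)).map (·.2)).Pairwise
      (fun a b => a ≤ b) := by
  have h1 := (sorted2_pairwise xs).filter (fun pr => pr.1 == k)
  refine List.pairwise_map.2 (List.Pairwise.imp_of_mem ?_ h1)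
  intro a b ha hb hab
  have hak : a.1 = k := by simpa using (List.of_mem_filter ha)
  have hbk : b.1 = k := by simpa using (List.of_mem_filter hb)
  have h2 : decide (b.2 < a.2) = false := by
    rw [← hab]
    simp [pvBefore, hak, hbk]
  exact le_of_not_gt (of_decide_eq_false h2)

-- each node is appended at most once over all edges
lemma lA_snd_sublist (l : List (String × Option String)) :
    ((l.filterMap (fun np => np.2.map (fun p => (p, np.1)))).map (·.2)).Sublist (l.map (·.1)) := by
  induction l with
  | nil => simp
  | cons a rest ih =>
    obtain ⟨n, p⟩ := a
    cases p with
    | none => simpa using ih.cons n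
    | some q => simpa using ih.cons₂ n

lemma pairwise_lt_of_le_nodup (l : List String)
    (hle : l.Pairwise (fun a b => a ≤ b)) (hnd : l.Nodup) :
    l.Pairwise (fun a b => a < b) :=
  (hle.and hnd).imp (fun h => lt_of_le_of_ne h.1 h.2)

-- ===== VERDICT (by name: the statement is the Claim_ definition above) =====
theorem dominator_tree_spec : Claim_equal_dominator_tree := by
  intro idom _ hpre
  unfold Spec_dominator_tree
  simp only [dominator_tree, dominator_tree_alt]
  set d := PySem.Dict.ofList idom with hd
  have hnd : d.keys.Nodup := PySem.Dict.nodup_keys_ofList idom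
  -- the initial tree
  set tree0 := d.keys.foldl (fun t n => t.insert n ([] : List String)) PySem.Dict.empty with ht0
  have h0items : tree0.items = d.keys.map (fun n => (n, ([] : List String))) := by
    rw [ht0]
    have := PySem.Dict.items_foldl_insert_fresh d.keys (fun a => a) (fun _ => ([] : List String))
      PySem.Dict.empty (by intro a _; simp [PySem.Dict.contains_empty]) (by simpa using hnd)
    simpa using this
  have h0keys : tree0.keys = d.keys := by
    show tree0.items.map (·.1) = d.keys
    rw [h0items, List.map_map]
    simp [Function.comp_def]
  have h0ndk : tree0.keys.Nodup := by rw [h0keys]; exact hnd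
  have h0getD : ∀ c, tree0.getD c [] = [] := by
    intro c
    by_cases hc : c ∈ d.keys
    · exact PySem.Dict.getD_of_mem_items tree0
        (by rw [h0items]; exact List.mem_map.2 ⟨c, hc, rfl⟩) h0ndk []
    · refine PySem.Dict.getD_of_not_contains tree0 [] ?_
      rw [← Bool.not_eq_true]
      intro hcon
      exact hc (h0keys ▸ (PySem.Dict.contains_iff_mem_keys tree0 c).1 hcon)
  -- Pre_: every parent value is a key
  have hparent : ∀ {n : String} {q : String}, (n, some q) ∈ d.items → q ∈ d.keys := by
    intro n q hmem
    have hv : some q ∈ d.values := by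
      show some q ∈ d.items.map (·.2)
      exact List.mem_map.2 ⟨(n, some q), hmem, rfl⟩
    have := (List.all_eq_true.1 hpre) _ hv
    simp only [Option.all_some] at this
    exact (PySem.Dict.contains_iff_mem_keys d q).1 (by exact this)
  -- the edge list and its sort
  set lA := d.items.filterMap (fun np => np.2.map (fun p => (p, np.1))) with hlA
  set edges := PySem.List.sorted2 lA (·.1) (·.2) with hedges
  have hperm : edges.Perm lA := PySem.List.sorted2_perm lA _ _ false
  have hlAk : ∀ pr ∈ lA, pr.1 ∈ d.keys := by
    intro pr hpr
    obtain ⟨np, hnp, heq⟩ := List.mem_filterMap.1 hpr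
    rcases np with ⟨n, _ | q⟩
    · simp at heq
    · simp only [Option.map_some, Option.some.injEq] at heq
      subst heq
      exact hparent hnp
  have hek : ∀ pr ∈ edges, pr.1 ∈ d.keys := fun pr hpr => hlAk pr (hperm.mem_iff.1 hpr)
  -- A's middle tree
  rw [foldA_eq, ← hlA]
  set treeA := lA.foldl pvStep tree0 with htA
  have hAkeys : treeA.keys = d.keys := by
    rw [htA, keys_pvStep_fold _ _ (fun pr h => h0keys ▸ hlAk pr h), h0keys]
  have hAndk : treeA.keys.Nodup := by rw [hAkeys]; exact hnd
  have hAgetD : ∀ c, treeA.getD c [] = (lA.filter (fun p => p.1 == c)).map (·.2) := by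
    intro c; rw [htA, getD_pvStep_fold, h0getD, List.nil_append]
  -- A's final tree after the sorting pass
  set treeA2 := treeA.keys.foldl (fun t k => t.modify k [] (fun l => PySem.List.sorted l (fun x => x))) treeA with htA2
  have hA2keys : treeA2.keys = treeA.keys := by
    rw [htA2, keys_sortfold _ _ (fun k h => h)]
  have hA2ndk : treeA2.keys.Nodup := by rw [hA2keys]; exact hAndk
  have hA2getD : ∀ c ∈ treeA.keys, treeA2.getD c [] = PySem.List.sorted (treeA.getD c []) (fun x => x) := by
    intro c hc
    rw [htA2, getD_sortfold _ _ _ hAndk, if_pos hc]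
  -- B's sweep is the fold over the sorted edges
  have hsweep : pvSweep edges tree0 0 = edges.foldl pvStep tree0 := by
    rw [pvSweep_eq_fold edges 0 tree0 h0ndk
      (fun pr hpr => (PySem.Dict.contains_iff_mem_keys tree0 pr.1).2 (h0keys ▸ hek pr hpr))]
    rfl
  rw [hsweep]
  set treeB := edges.foldl pvStep tree0 with htB
  have hBkeys : treeB.keys = d.keys := by
    rw [htB, keys_pvStep_fold _ _ (fun pr h => h0keys ▸ hek pr h), h0keys]
  have hBndk : treeB.keys.Nodup := by rw [hBkeys]; exact hnd
  have hBgetD : ∀ c, treeB.getD c [] = (edges.filter (fun p => p.1 == c)).map (·.2) := by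
    intro c; rw [htB, getD_pvStep_fold, h0getD, List.nil_append]
  -- items of both sides as maps over d.keys
  rw [PySem.Dict.items_eq_map_keys treeA2 hA2ndk [], PySem.Dict.items_eq_map_keys treeB hBndk [],
    hA2keys, hAkeys, hBkeys]
  refine List.map_congr_left ?_
  intro k hk
  rw [hA2getD k (hAkeys ▸ hk), hAgetD, hBgetD]
  congr 1
  -- per-key: sorting A's children gives B's contiguous run
  have hpermk : ((edges.filter (fun pr => pr.1 == k)).map (·.2)).Perm
      ((lA.filter (fun pr => pr.1 == k)).map (·.2)) :=
    ((hperm.filter _).map _)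
  have hndB : ((edges.filter (fun pr => pr.1 == k)).map (·.2)).Nodup := by
    refine hpermk.nodup_iff.2 ?_
    have hsub : ((lA.filter (fun pr => pr.1 == k)).map (·.2)).Sublist (lA.map (·.2)) :=
      List.Sublist.map _ List.filter_sublist
    exact hsub.nodup ((lA_snd_sublist d.items).nodup hnd)
  have hpw : ((edges.filter (fun pr => pr.1 == k)).map (·.2)).Pairwise (fun a b => a < b) :=
    pairwise_lt_of_le_nodup _ (hedges ▸ sorted2_filter_snd_pairwise lA k) hndB
  exact (PySem.List.sorted_eq_of_perm_of_pairwise_lt _ _ _ hpermk hpw)
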